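-- pv_equiv track=rewrite | github.com/Tomusss/programowanie | lista4/zad1.py | rangi
-- ===== SOURCE A (Python) =====
-- def rangi(lista):
--     lista_rang = []
--     posortowana = sorted(lista)
--     for x in range(0,len(lista)):
--         ranga = posortowana.index(lista[x])
--         lista_rang.append(ranga)
--         posortowana[ranga] = None
--     return lista_rang
-- ===== SOURCE B (Python) =====
-- def rangi(lista):
--     first = {}
--     for i, v in enumerate(sorted(lista)):
--         if v not in first:
--             first[v] = i
--     seen = {}
--     out = []
--     for v in lista:
--         k = seen.get(v, 0)
--         out.append(first[v] + k)
--         seen[v] = k + 1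
--     return out
-- ===== Notes on version B (the rewrite author's own statement) =====
-- stated objective: faster
-- what changed: Replaces the per-element linear scan (.index) and in-place None overwrite of the sorted copy with a one-pass first-index dictionary over the sorted list plus a running per-value duplicate counter.
import Mathlib
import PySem

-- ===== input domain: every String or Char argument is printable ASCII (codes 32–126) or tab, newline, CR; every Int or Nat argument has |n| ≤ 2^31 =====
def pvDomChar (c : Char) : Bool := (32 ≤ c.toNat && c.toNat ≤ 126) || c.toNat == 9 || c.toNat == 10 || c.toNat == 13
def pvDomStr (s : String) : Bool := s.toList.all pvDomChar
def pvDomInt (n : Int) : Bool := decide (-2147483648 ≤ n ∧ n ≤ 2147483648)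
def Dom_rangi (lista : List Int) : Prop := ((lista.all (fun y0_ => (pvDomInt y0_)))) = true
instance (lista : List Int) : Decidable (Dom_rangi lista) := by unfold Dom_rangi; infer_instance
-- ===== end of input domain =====

-- B replaces A's per-element linear scan of the mutated sorted copy with a first-index
-- dictionary plus a running per-value counter (objective: faster, O(n log n) vs O(n^2)).

-- ===== PORT A =====
-- one loop iteration of A: given (lista_rang, posortowana) and lista[x], find the index,
-- append it, blank that slot; the 'none' branch is unreachable (the value is always present)
-- and only makes the function total.
def rangiStep (st : List Int × List (Option Int)) (v : Int) : List Int × List (Option Int) :=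
  match PySem.List.index? st.2 (some v) with
  | none => st
  | some ranga => (st.1 ++ [(ranga : Int)], st.2.set ranga none)

def rangi (lista : List Int) : List Int :=
  ((PySem.List.pyRange 0 (lista.length : Int) 1).foldl
    (fun st x => rangiStep st (PySem.List.pyGetD lista x 0))
    (([] : List Int), (PySem.List.sorted lista (fun x => x) false).map some)).1

-- ===== PORT B =====
-- first-occurrence-index dictionary step: if v not in first: first[v] = i
def firstStep (d : PySem.Dict Int Int) (p : Int × Int) : PySem.Dict Int Int :=
  if d.contains p.2 then d else d.insert p.2 p.1

-- main-loop step over (seen, out); first[v] ported as getD v 0 (the key is always present)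
def outStep (first : PySem.Dict Int Int) (st : PySem.Dict Int Int × List Int) (v : Int) :
    PySem.Dict Int Int × List Int :=
  let k := st.1.getD v 0
  (st.1.insert v (k + 1), st.2 ++ [first.getD v 0 + k])

def rangi_alt (lista : List Int) : List Int :=
  let first := (PySem.List.enumerate (PySem.List.sorted lista (fun x => x) false) 0).foldl
    firstStep (PySem.Dict.mk [])
  (lista.foldl (outStep first) ((PySem.Dict.mk []), ([] : List Int))).2

-- ===== PRECONDITION & SPEC =====
def Spec_rangi (lista : List Int) (out : List Int) : Prop := out = rangi_alt lista
instance (lista : List Int) (out : List Int) : Decidable (Spec_rangi lista out) := by unfold Spec_rangi; infer_instance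

-- ===== CLAIM (what is proved, stated in full; the proofs are below) =====
def Claim_equal_rangi : Prop := ∀ (lista : List Int), Dom_rangi lista → Spec_rangi lista (rangi lista)

-- ===== LEMMAS AND PROOFS =====

-- common reference computation: ranks of `rest` against sorted list `s`,
-- `c w` = number of occurrences of `w` already consumed.
def bump (c : Int → Nat) (v : Int) : Int → Nat := fun w => if w = v then c w + 1 else c w

def goRanks (s : List Int) : List Int → (Int → Nat) → List Int
  | [], _ => []
  | v :: t, c => ((s.idxOf v : Int) + (c v : Int)) :: goRanks s t (bump c v)

def drop1 (c : Int → Nat) (a : Int) : Int → Nat := fun w => if w = a then c w - 1 else c w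

-- A's posortowana after consuming counts c: the first (c w) occurrences of each value w blanked
def mask : List Int → (Int → Nat) → List (Option Int)
  | [], _ => []
  | a :: t, c =>
    if c a = 0 then some a :: mask t c
    else none :: mask t (drop1 c a)

theorem mask_zero (s : List Int) : mask s (fun _ => 0) = s.map some := by
  induction s with
  | nil => rfl
  | cons a t ih => simp [mask, ih]

theorem idxOf_head (a : Int) (t : List Int) (hs : (a :: t).Pairwise (· ≤ ·))
    (h : a ∈ t) : t.idxOf a = 0 := by
  cases t with
  | nil => cases h
  | cons b t' =>
    have hab : a ≤ b := (List.pairwise_cons.mp hs).1 b (by simp)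
    have hba : b = a := by
      rcases List.mem_cons.mp h with h1 | h2
      · omega
      · have := (List.pairwise_cons.mp (List.pairwise_cons.mp hs).2).1 a h2
        omega
    simp [hba, List.idxOf_cons_self]

theorem count_cons_flip (v a : Int) (t : List Int) :
    List.count v (a :: t) = List.count v t + (if v = a then 1 else 0) := by
  rw [List.count_cons]
  by_cases h : v = a
  · simp [h]
  · simp [h, Ne.symm h]

theorem mask_index (s : List Int) (c : Int → Nat) (v : Int)
    (hs : s.Pairwise (· ≤ ·)) (hb : ∀ w, c w ≤ s.count w) (hv : c v < s.count v) :
    PySem.List.index? (mask s c) (some v) = some (s.idxOf v + c v) := by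
  induction s generalizing c with
  | nil => simp [List.count_nil] at hv
  | cons a t ih =>
    have hst : t.Pairwise (· ≤ ·) := (List.pairwise_cons.mp hs).2
    by_cases ha : c a = 0
    · rw [show mask (a :: t) c = some a :: mask t c by rw [mask, if_pos ha]]
      by_cases hva : v = a
      · subst hva
        rw [PySem.List.index?_cons_self, List.idxOf_cons_self, ha]
      · have hvt : c v < t.count v := by
          have := hv; rw [count_cons_flip, if_neg hva] at this; omega
        have hbt : ∀ w, c w ≤ t.count w := by
          intro w
          by_cases hw : w = a
          · subst hw; omega
          · have := hb w; rw [count_cons_flip, if_neg hw] at this; omega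
        rw [PySem.List.index?_cons_of_ne _ (by simpa using Ne.symm hva), ih _ hst hbt hvt,
          List.idxOf_cons_ne _ (Ne.symm hva)]
        simp; omega
    · rw [show mask (a :: t) c = none :: mask t (drop1 c a) by rw [mask, if_neg ha]]
      by_cases hva : v = a
      · subst hva
        have hv' : c v < t.count v + 1 := by
          have := hv; rw [List.count_cons_self] at this; omega
        have hmem : v ∈ t := List.count_pos_iff.mp (by omega)
        have hvt : drop1 c v v < t.count v := by
          simp [drop1]; omega
        have hbt : ∀ w, drop1 c v w ≤ t.count w := by
          intro w; simp only [drop1]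
          by_cases hw : w = v
          · subst hw; simp; omega
          · have := hb w; rw [count_cons_flip, if_neg hw] at this
            simp [hw]; omega
        rw [PySem.List.index?_cons_of_ne _ (by simp), ih _ hst hbt hvt,
          idxOf_head v t hs hmem, List.idxOf_cons_self]
        simp [drop1]; omega
      · have hvt : drop1 c a v < t.count v := by
          simp only [drop1, if_neg hva]
          have := hv; rw [count_cons_flip, if_neg hva] at this; omega
        have hbt : ∀ w, drop1 c a w ≤ t.count w := by
          intro w; simp only [drop1]
          by_cases hw : w = a
          · subst hw
            have := hb w; rw [List.count_cons_self] at this; simp; omega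
          · have := hb w; rw [count_cons_flip, if_neg hw] at this
            simp [hw]; omega
        rw [PySem.List.index?_cons_of_ne _ (by simp), ih _ hst hbt hvt,
          List.idxOf_cons_ne _ (Ne.symm hva)]
        simp [drop1, hva]; omega

theorem mask_set (s : List Int) (c : Int → Nat) (v : Int)
    (hs : s.Pairwise (· ≤ ·)) (hb : ∀ w, c w ≤ s.count w) (hv : c v < s.count v) :
    (mask s c).set (s.idxOf v + c v) none = mask s (bump c v) := by
  induction s generalizing c with
  | nil => simp [List.count_nil] at hv
  | cons a t ih =>
    have hst : t.Pairwise (· ≤ ·) := (List.pairwise_cons.mp hs).2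
    by_cases ha : c a = 0
    · rw [show mask (a :: t) c = some a :: mask t c by rw [mask, if_pos ha]]
      by_cases hva : v = a
      · subst hva
        have hbz : ¬ bump c v v = 0 := by simp [bump]
        rw [List.idxOf_cons_self, ha]
        rw [show mask (v :: t) (bump c v) = none :: mask t (drop1 (bump c v) v) by
          rw [mask, if_neg hbz]]
        have hd : drop1 (bump c v) v = c := by
          funext w; by_cases hw : w = v <;> simp [drop1, bump, hw, ha]
        rw [hd]; rfl
      · have hvt : c v < t.count v := by
          have := hv; rw [count_cons_flip, if_neg hva] at this; omega
        have hbt : ∀ w, c w ≤ t.count w := by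
          intro w
          by_cases hw : w = a
          · subst hw; omega
          · have := hb w; rw [count_cons_flip, if_neg hw] at this; omega
        have hbz : bump c v a = 0 := by simp [bump, Ne.symm hva, ha]
        rw [List.idxOf_cons_ne _ (Ne.symm hva),
          show t.idxOf v + 1 + c v = (t.idxOf v + c v) + 1 by omega,
          List.set_cons_succ, ih _ hst hbt hvt]
        rw [show mask (a :: t) (bump c v) = some a :: mask t (bump c v) by
          rw [mask, if_pos hbz]]
    · rw [show mask (a :: t) c = none :: mask t (drop1 c a) by rw [mask, if_neg ha]]
      by_cases hva : v = a
      · subst hva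
        have hv' : c v < t.count v + 1 := by
          have := hv; rw [List.count_cons_self] at this; omega
        have hmem : v ∈ t := List.count_pos_iff.mp (by omega)
        have hvt : drop1 c v v < t.count v := by simp [drop1]; omega
        have hbt : ∀ w, drop1 c v w ≤ t.count w := by
          intro w; simp only [drop1]
          by_cases hw : w = v
          · subst hw; simp; omega
          · have := hb w; rw [count_cons_flip, if_neg hw] at this
            simp [hw]; omega
        obtain ⟨m, hm⟩ : ∃ m, c v = m + 1 := ⟨c v - 1, by omega⟩
        rw [List.idxOf_cons_self, hm]
        rw [show (0 : Nat) + (m + 1) = m + 1 by omega, List.set_cons_succ]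
        have harg : t.idxOf v + drop1 c v v = m := by
          rw [idxOf_head v t hs hmem]; simp [drop1, hm]
        rw [← harg, ih _ hst hbt hvt]
        have hbz : ¬ bump c v v = 0 := by simp [bump]
        rw [show mask (v :: t) (bump c v) = none :: mask t (drop1 (bump c v) v) by
          rw [mask, if_neg hbz]]
        have hd : bump (drop1 c v) v = drop1 (bump c v) v := by
          funext w; by_cases hw : w = v <;> simp [drop1, bump, hw] <;> omega
        rw [hd]
      · have hvt : drop1 c a v < t.count v := by
          simp only [drop1, if_neg hva]
          have := hv; rw [count_cons_flip, if_neg hva] at this; omega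
        have hbt : ∀ w, drop1 c a w ≤ t.count w := by
          intro w; simp only [drop1]
          by_cases hw : w = a
          · subst hw
            have := hb w; rw [List.count_cons_self] at this; simp; omega
          · have := hb w; rw [count_cons_flip, if_neg hw] at this
            simp [hw]; omega
        have harg : drop1 c a v = c v := by simp [drop1, hva]
        rw [List.idxOf_cons_ne _ (Ne.symm hva),
          show t.idxOf v + 1 + c v = (t.idxOf v + c v) + 1 by omega,
          List.set_cons_succ, ← harg, ih _ hst hbt hvt]
        have hbz : ¬ bump c v a = 0 := by simp [bump, Ne.symm hva]; omega
        rw [show mask (a :: t) (bump c v) = none :: mask t (drop1 (bump c v) a) by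
          rw [mask, if_neg hbz]]
        have hd : bump (drop1 c a) v = drop1 (bump c v) a := by
          funext w
          by_cases hw : w = a
          · subst hw; simp [drop1, bump, Ne.symm hva]
          · by_cases hw2 : w = v <;> simp [drop1, bump, hw, hw2, hva]
        rw [hd]

-- A's loop computes goRanks
theorem foldA (s : List Int) (hs : s.Pairwise (· ≤ ·)) :
    ∀ (rest : List Int) (acc : List Int) (c : Int → Nat),
      (∀ w, c w + rest.count w ≤ s.count w) →
      (rest.foldl rangiStep (acc, mask s c)).1 = acc ++ goRanks s rest c := by
  intro rest
  induction rest with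
  | nil => intro acc c _; simp [goRanks]
  | cons v t ih =>
    intro acc c hb
    have hv : c v < s.count v := by
      have := hb v; rw [List.count_cons_self] at this; omega
    have hb1 : ∀ w, c w ≤ s.count w := fun w => by have := hb w; omega
    have hb2 : ∀ w, bump c v w + t.count w ≤ s.count w := by
      intro w
      by_cases hw : w = v
      · subst hw
        have := hb w; rw [List.count_cons_self] at this; simp [bump]; omega
      · have := hb w; rw [count_cons_flip, if_neg hw] at this; simp [bump, hw]; omega
    have hstep : rangiStep (acc, mask s c) v
        = (acc ++ [((s.idxOf v + c v : Nat) : Int)], mask s (bump c v)) := by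
      simp only [rangiStep, mask_index s c v hs hb1 hv, mask_set s c v hs hb1 hv]
    rw [List.foldl_cons, hstep, ih _ _ hb2]
    simp [goRanks]

-- B's first-index dictionary
theorem foldFirst (s : List Int) :
    ∀ (n : Int) (d : PySem.Dict Int Int) (v : Int),
      ((PySem.List.enumerate s n).foldl firstStep d).get? v =
        if d.contains v ∨ v ∉ s then d.get? v else some (n + (s.idxOf v : Int)) := by
  induction s with
  | nil => intro n d v; simp
  | cons a t ih =>
    intro n d v
    rw [PySem.List.enumerate_cons, List.foldl_cons]
    by_cases hda : d.contains a = true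
    · rw [show firstStep d (n, a) = d by simp [firstStep, hda], ih]
      by_cases hva : v = a
      · subst hva; simp [hda]
      · by_cases hvt : v ∈ t
        · simp [hvt, hva, List.idxOf_cons_ne _ (Ne.symm hva)]
          by_cases hdv : d.contains v = true <;> simp [hdv] <;> push_cast <;> ring
        · simp [hva, hvt]
    · rw [show firstStep d (n, a) = d.insert a n by simp [firstStep, hda], ih]
      by_cases hva : v = a
      · subst hva
        simp [PySem.Dict.contains_insert_self, hda,
          PySem.Dict.get?_insert_self, List.idxOf_cons_self]
      · rw [PySem.Dict.get?_insert_of_ne d n hva,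
          show (d.insert a n).contains v = d.contains v by
            rw [PySem.Dict.contains_insert]; simp [hva]]
        by_cases hvt : v ∈ t
        · simp [hvt, hva, List.idxOf_cons_ne _ (Ne.symm hva)]
          by_cases hdv : d.contains v = true <;> simp [hdv] <;> push_cast <;> ring
        · simp [hva, hvt]

-- B's main loop computes goRanks
theorem foldB (s : List Int) (first : PySem.Dict Int Int)
    (hf : ∀ v ∈ s, first.getD v 0 = (s.idxOf v : Int)) :
    ∀ (rest : List Int) (seen : PySem.Dict Int Int) (acc : List Int) (c : Int → Nat),
      (∀ w, seen.getD w 0 = (c w : Int)) → (∀ w ∈ rest, w ∈ s) →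
      (rest.foldl (outStep first) (seen, acc)).2 = acc ++ goRanks s rest c := by
  intro rest
  induction rest with
  | nil => intro seen acc c _ _; simp [goRanks]
  | cons v t ih =>
    intro seen acc c hc hmem
    have hv : v ∈ s := hmem v (by simp)
    have hstep : outStep first (seen, acc) v
        = (seen.insert v ((c v : Int) + 1), acc ++ [(s.idxOf v : Int) + (c v : Int)]) := by
      simp only [outStep, hc v, hf v hv]
    rw [List.foldl_cons, hstep,
      ih _ _ (bump c v) (fun w => by
        by_cases hw : w = v
        · subst hw; rw [PySem.Dict.getD_insert_self seen]; simp [bump]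
        · rw [PySem.Dict.getD_insert_of_ne seen _ _ hw]; simp [bump, hw, hc w])
        (fun w hw => hmem w (by simp [hw]))]
    simp [goRanks]

-- ===== VERDICT (by name: the statement is the Claim_ definition above) =====
theorem sorted_sorted_pairwise (lista : List Int) :
    (PySem.List.sorted lista (fun x => x) false).Pairwise (· ≤ ·) :=
  PySem.List.sorted_pairwise lista (fun x => x)

-- ===== VERDICT (by name: the statement is the Claim_ definition above) =====
theorem rangi_spec : Claim_equal_rangi := by
  intro lista _
  unfold Spec_rangi rangi rangi_alt
  set s := PySem.List.sorted lista (fun x => x) false with hsdef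
  have hperm : s.Perm lista := PySem.List.sorted_perm lista (fun x => x) false
  have hpw : s.Pairwise (· ≤ ·) := sorted_sorted_pairwise lista
  -- A side: fold over the range is a fold over lista
  rw [PySem.List.foldl_pyRange_zero_pyGetD' lista 0 rangiStep
        (([] : List Int), s.map some)]
  rw [← mask_zero s]
  rw [foldA s hpw lista [] (fun _ => 0)
        (fun w => by simpa using (hperm.count_eq w).ge)]
  -- B side
  have hfirst : ∀ v ∈ s,
      ((PySem.List.enumerate s 0).foldl firstStep (PySem.Dict.mk [])).getD v 0
        = (s.idxOf v : Int) := by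
    intro v hv
    rw [PySem.Dict.getD_eq_get?_getD, foldFirst s 0 (PySem.Dict.mk []) v]
    simp [hv]
  rw [foldB s _ hfirst lista (PySem.Dict.mk []) [] (fun _ => 0)
        (fun w => rfl) (fun w hw => (PySem.List.mem_sorted lista _ false w).mpr hw)]
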